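-- pv_equiv track=rewrite | github.com/Shaderx/umatracker | sort_race_complete.py | sort_racecomplete
-- ===== SOURCE A (Python) =====
-- from typing import Dict, List, Tuple
--
-- def sort_racecomplete(
--     name_to_sorted_index: Dict[str, int],
--     header_line: str,
--     complete_rows: List[Tuple[int, str, str]],
-- ) -> List[str]:
--     """Return sorted lines (including header as first line)."""
--
--     def sort_key(item: Tuple[int, str, str]) -> Tuple[int, int, int]:
--         original_idx, _line, japanese_name = item
--         if japanese_name in name_to_sorted_index:
--             return (0, name_to_sorted_index[japanese_name], original_idx)
--         # Append to end, preserving original order among unmatched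
--         return (1, original_idx, 0)
--
--     sorted_rows = sorted(complete_rows, key=sort_key)
--     output_lines: List[str] = [header_line]
--     output_lines.extend(line for _, line, _ in sorted_rows)
--     return output_lines
-- ===== SOURCE B (Python) =====
-- def sort_racecomplete(name_to_sorted_index, header_line, complete_rows):
--     """Partition rows into matched/unmatched, sort each with its own simple key,
--     concatenate after the header (alternative decomposition of the same order)."""
--     matched = [r for r in complete_rows if r[2] in name_to_sorted_index]
--     unmatched = [r for r in complete_rows if r[2] not in name_to_sorted_index]
--     matched = sorted(matched, key=lambda r: (name_to_sorted_index[r[2]], r[0]))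
--     unmatched = sorted(unmatched, key=lambda r: r[0])
--     return [header_line] + [r[1] for r in matched] + [r[1] for r in unmatched]
-- ===== Notes on version B (the rewrite author's own statement) =====
-- stated objective: alternative
-- what changed: Replaces the single stable sort on a tag-encoded 3-tuple key by a partition of the rows into matched/unmatched followed by two independent stable sorts with simple keys ((sorted_index, original_idx) and original_idx).
import Mathlib
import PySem

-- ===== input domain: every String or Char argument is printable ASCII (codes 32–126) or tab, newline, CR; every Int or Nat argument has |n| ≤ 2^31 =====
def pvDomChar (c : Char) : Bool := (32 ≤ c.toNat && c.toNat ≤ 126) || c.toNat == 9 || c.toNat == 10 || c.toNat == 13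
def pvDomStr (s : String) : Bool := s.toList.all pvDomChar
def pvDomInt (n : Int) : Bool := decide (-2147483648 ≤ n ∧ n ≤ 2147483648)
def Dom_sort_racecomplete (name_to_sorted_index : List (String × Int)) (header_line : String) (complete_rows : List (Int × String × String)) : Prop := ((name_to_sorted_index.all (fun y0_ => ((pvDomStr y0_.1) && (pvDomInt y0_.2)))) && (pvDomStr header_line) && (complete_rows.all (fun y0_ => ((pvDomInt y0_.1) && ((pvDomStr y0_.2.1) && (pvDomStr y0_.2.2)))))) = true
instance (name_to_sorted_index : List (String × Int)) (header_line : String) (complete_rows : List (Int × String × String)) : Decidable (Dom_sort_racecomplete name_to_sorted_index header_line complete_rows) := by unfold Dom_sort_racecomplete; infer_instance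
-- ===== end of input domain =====

-- B replaces A's single stable sort on a tag-encoded 3-tuple key by a partition into
-- matched/unmatched rows followed by two independent stable sorts with simple keys (alternative decomposition, same cost).

-- ===== PORT A =====
-- Helper: Python lexicographic '<' on an (Int, Int, Int) tuple
def pvKey3Lt (a b : Int × Int × Int) : Bool :=
  decide (a.1 < b.1) || !decide (b.1 < a.1) && (decide (a.2.1 < b.2.1) || !decide (b.2.1 < a.2.1) && decide (a.2.2 < b.2.2))

-- A's sort_key: (0, name_to_sorted_index[name], idx) if name in dict, else (1, idx, 0)
def pvSortKey (d : List (String × Int)) (item : Int × String × String) : Int × Int × Int :=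
  if PySem.Dict.contains (PySem.Dict.mk d) item.2.2 then (0, PySem.Dict.getD (PySem.Dict.mk d) item.2.2 0, item.1) else (1, item.1, 0)

def sort_racecomplete (name_to_sorted_index : List (String × Int)) (header_line : String) (complete_rows : List (Int × String × String)) : List String :=
  -- sorted(complete_rows, key=sort_key): Python's stable sort with a tuple key
  let sorted_rows := complete_rows.foldl
    (fun acc x => PySem.List.insertBy (fun a b => pvKey3Lt (pvSortKey name_to_sorted_index a) (pvSortKey name_to_sorted_index b)) x acc) []
  -- output_lines = [header_line]; output_lines.extend(line for _, line, _ in sorted_rows)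
  [header_line] ++ sorted_rows.map (fun r => r.2.1)

-- ===== PORT B =====
def sort_racecomplete_alt (name_to_sorted_index : List (String × Int)) (header_line : String) (complete_rows : List (Int × String × String)) : List String :=
  let matched := complete_rows.filter (fun r => PySem.Dict.contains (PySem.Dict.mk name_to_sorted_index) r.2.2)
  let unmatched := complete_rows.filter (fun r => !PySem.Dict.contains (PySem.Dict.mk name_to_sorted_index) r.2.2)
  let msorted := PySem.List.sorted2 matched (fun r => PySem.Dict.getD (PySem.Dict.mk name_to_sorted_index) r.2.2 0) (fun r => r.1)
  let usorted := PySem.List.sorted unmatched (fun r => r.1)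
  [header_line] ++ msorted.map (fun r => r.2.1) ++ usorted.map (fun r => r.2.1)

-- ===== PRECONDITION & SPEC =====
def Spec_sort_racecomplete (name_to_sorted_index : List (String × Int)) (header_line : String) (complete_rows : List (Int × String × String)) (out : List String) : Prop := out = sort_racecomplete_alt name_to_sorted_index header_line complete_rows
instance (name_to_sorted_index : List (String × Int)) (header_line : String) (complete_rows : List (Int × String × String)) (out : List String) : Decidable (Spec_sort_racecomplete name_to_sorted_index header_line complete_rows out) := by unfold Spec_sort_racecomplete; infer_instance

-- ===== CLAIM (what is proved, stated in full; the proofs are below) =====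
def Claim_equal_sort_racecomplete : Prop := ∀ (name_to_sorted_index : List (String × Int)) (header_line : String) (complete_rows : List (Int × String × String)), Dom_sort_racecomplete name_to_sorted_index header_line complete_rows → Spec_sort_racecomplete name_to_sorted_index header_line complete_rows (sort_racecomplete name_to_sorted_index header_line complete_rows)

-- ===== LEMMAS AND PROOFS =====

lemma pv_insertBy_append_left {α : Type} (lt : α → α → Bool) (x : α) (A B : List α)
    (h : ∀ b ∈ B, lt x b = true) :
    PySem.List.insertBy lt x (A ++ B) = PySem.List.insertBy lt x A ++ B := by
  induction A with
  | nil =>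
    cases B with
    | nil => simp [PySem.List.insertBy]
    | cons b B' => simp [PySem.List.insertBy, h b (by simp)]
  | cons a A' ih =>
    simp only [List.cons_append, PySem.List.insertBy]
    by_cases hx : lt x a <;> simp [hx, ih]

lemma pv_insertBy_append_right {α : Type} (lt : α → α → Bool) (x : α) (A B : List α)
    (h : ∀ a ∈ A, lt x a = false) :
    PySem.List.insertBy lt x (A ++ B) = A ++ PySem.List.insertBy lt x B := by
  induction A with
  | nil => simp
  | cons a A' ih =>
    simp only [List.cons_append, PySem.List.insertBy, h a (by simp)]
    simp only [Bool.false_eq_true, if_false]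
    rw [ih (fun a ha => h a (by simp [ha]))]

lemma pv_insertBy_congr {α : Type} (lt lt' : α → α → Bool) (x : α) (ys : List α)
    (h : ∀ y ∈ ys, lt x y = lt' x y) :
    PySem.List.insertBy lt x ys = PySem.List.insertBy lt' x ys := by
  induction ys with
  | nil => rfl
  | cons y ys' ih =>
    simp only [PySem.List.insertBy, h y (by simp)]
    by_cases hx : lt' x y <;> simp [hx, ih (fun z hz => h z (by simp [hz]))]

-- The heart: the stable insertion fold with A's tagged 3-tuple key splits into two
-- independent insertion folds over the matched and unmatched rows.
lemma pv_split (d : List (String × Int)) (xs accM accU : List (Int × String × String))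
    (hM : ∀ a ∈ accM, PySem.Dict.contains (PySem.Dict.mk d) a.2.2 = true)
    (hU : ∀ b ∈ accU, PySem.Dict.contains (PySem.Dict.mk d) b.2.2 = false) :
    xs.foldl (fun acc x => PySem.List.insertBy (fun a b => pvKey3Lt (pvSortKey d a) (pvSortKey d b)) x acc) (accM ++ accU)
    = (xs.filter (fun r => PySem.Dict.contains (PySem.Dict.mk d) r.2.2)).foldl
        (fun acc x => PySem.List.insertBy (fun a b =>
          decide (PySem.Dict.getD (PySem.Dict.mk d) a.2.2 0 < PySem.Dict.getD (PySem.Dict.mk d) b.2.2 0) ||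
          !decide (PySem.Dict.getD (PySem.Dict.mk d) b.2.2 0 < PySem.Dict.getD (PySem.Dict.mk d) a.2.2 0) && decide (a.1 < b.1)) x acc) accM
      ++ (xs.filter (fun r => !PySem.Dict.contains (PySem.Dict.mk d) r.2.2)).foldl
          (fun acc x => PySem.List.insertBy (fun a b => decide (a.1 < b.1)) x acc) accU := by
  induction xs generalizing accM accU with
  | nil => simp
  | cons x xs ih =>
    by_cases hx : PySem.Dict.contains (PySem.Dict.mk d) x.2.2 = true
    · have e1 : PySem.List.insertBy (fun a b => pvKey3Lt (pvSortKey d a) (pvSortKey d b)) x (accM ++ accU)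
          = PySem.List.insertBy (fun a b => pvKey3Lt (pvSortKey d a) (pvSortKey d b)) x accM ++ accU := by
        apply pv_insertBy_append_left
        intro b hb
        simp [pvKey3Lt, pvSortKey, hx, hU b hb]
      have e2 : PySem.List.insertBy (fun a b => pvKey3Lt (pvSortKey d a) (pvSortKey d b)) x accM
          = PySem.List.insertBy (fun a b =>
              decide (PySem.Dict.getD (PySem.Dict.mk d) a.2.2 0 < PySem.Dict.getD (PySem.Dict.mk d) b.2.2 0) ||
              !decide (PySem.Dict.getD (PySem.Dict.mk d) b.2.2 0 < PySem.Dict.getD (PySem.Dict.mk d) a.2.2 0) && decide (a.1 < b.1)) x accM := by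
        apply pv_insertBy_congr
        intro y hy
        simp [pvKey3Lt, pvSortKey, hx, hM y hy]
      have hM' : ∀ a ∈ PySem.List.insertBy (fun a b =>
              decide (PySem.Dict.getD (PySem.Dict.mk d) a.2.2 0 < PySem.Dict.getD (PySem.Dict.mk d) b.2.2 0) ||
              !decide (PySem.Dict.getD (PySem.Dict.mk d) b.2.2 0 < PySem.Dict.getD (PySem.Dict.mk d) a.2.2 0) && decide (a.1 < b.1)) x accM,
          PySem.Dict.contains (PySem.Dict.mk d) a.2.2 = true := by
        intro a ha
        rcases (PySem.List.mem_insertBy _ _ _ _).1 ha with h1 | h1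
        · exact h1 ▸ hx
        · exact hM a h1
      rw [List.foldl_cons, e1, e2, ih _ _ hM' hU]
      simp only [List.filter_cons, hx, Bool.not_true, if_true, Bool.false_eq_true, if_false, List.foldl_cons]
    · have hx' : PySem.Dict.contains (PySem.Dict.mk d) x.2.2 = false := Bool.eq_false_iff.mpr hx
      have e1 : PySem.List.insertBy (fun a b => pvKey3Lt (pvSortKey d a) (pvSortKey d b)) x (accM ++ accU)
          = accM ++ PySem.List.insertBy (fun a b => pvKey3Lt (pvSortKey d a) (pvSortKey d b)) x accU := by
        apply pv_insertBy_append_right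
        intro a ha
        simp [pvKey3Lt, pvSortKey, hx', hM a ha]
      have e2 : PySem.List.insertBy (fun a b => pvKey3Lt (pvSortKey d a) (pvSortKey d b)) x accU
          = PySem.List.insertBy (fun a b => decide (a.1 < b.1)) x accU := by
        apply pv_insertBy_congr
        intro y hy
        simp [pvKey3Lt, pvSortKey, hx', hU y hy]
      have hU' : ∀ b ∈ PySem.List.insertBy (fun a b => decide (a.1 < b.1)) x accU,
          PySem.Dict.contains (PySem.Dict.mk d) b.2.2 = false := by
        intro b hb
        rcases (PySem.List.mem_insertBy _ _ _ _).1 hb with h1 | h1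
        · exact h1 ▸ hx'
        · exact hU b h1
      rw [List.foldl_cons, e1, e2, ih _ _ hM hU']
      simp only [List.filter_cons, hx', Bool.not_false, if_true, Bool.false_eq_true, if_false, List.foldl_cons]

theorem sort_racecomplete_spec : Claim_equal_sort_racecomplete := by
  intro d h rows _
  unfold Spec_sort_racecomplete sort_racecomplete sort_racecomplete_alt
  have hs := pv_split d rows [] [] (by simp) (by simp)
  simp only [List.nil_append] at hs
  rw [hs]
  simp [PySem.List.sorted2, PySem.List.sorted]
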